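-- pv_equiv track=rewrite | github.com/apressato/APUtils | APUtils/APUtilCF.py | __cons_num
-- ===== SOURCE A (Python) =====
-- def __cons_num(aStr, aPos):
--     sResult = '@'
--     num = 0
--     for ch in aStr:
--       if ch not in ['A', 'E', 'I', 'O', 'U']:
--          num = num + 1
--          if num == aPos:
--             sResult = ch
--             break
--     return sResult
-- ===== SOURCE B (Python) =====
-- def __cons_num(aStr, aPos):
--     cons = [ch for ch in aStr if ch not in ('A', 'E', 'I', 'O', 'U')]
--     return cons[aPos - 1] if 1 <= aPos <= len(cons) else '@'
-- ===== Notes on version B (the rewrite author's own statement) =====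
-- stated objective: simpler
-- what changed: Replaces the counting loop with early break by materialize-then-index: filter all consonants once, then return the (aPos-1)-th element if in range, else '@'.
import Mathlib
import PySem

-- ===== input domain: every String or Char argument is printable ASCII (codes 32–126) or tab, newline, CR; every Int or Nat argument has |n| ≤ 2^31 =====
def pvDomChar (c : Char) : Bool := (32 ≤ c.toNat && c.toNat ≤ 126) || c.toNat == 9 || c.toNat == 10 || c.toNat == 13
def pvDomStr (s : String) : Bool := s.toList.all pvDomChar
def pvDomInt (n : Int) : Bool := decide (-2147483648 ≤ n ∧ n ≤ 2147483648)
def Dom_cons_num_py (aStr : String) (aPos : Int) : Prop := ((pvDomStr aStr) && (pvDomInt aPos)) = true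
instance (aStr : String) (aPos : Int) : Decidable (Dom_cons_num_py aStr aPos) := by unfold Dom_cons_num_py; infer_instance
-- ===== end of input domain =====

-- B replaces A's counting loop with early break by filter-then-index (simpler decomposition, same O(n) cost).

-- ===== PORT A =====
-- A's loop: carry the counter num, break (return ch) when num reaches aPos.
def consNumLoop : List Char → Int → Int → String
  | [], _, _ => "@"
  | ch :: t, num, aPos =>
    if ch ∈ ['A', 'E', 'I', 'O', 'U'] then consNumLoop t num aPos
    else if num + 1 = aPos then String.ofList [ch]
    else consNumLoop t (num + 1) aPos

def cons_num_py (aStr : String) (aPos : Int) : String :=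
  consNumLoop aStr.toList 0 aPos

-- ===== PORT B =====
def isCons (ch : Char) : Bool := !(ch ∈ ['A', 'E', 'I', 'O', 'U'])

def cons_num_py_alt (aStr : String) (aPos : Int) : String :=
  let cons := aStr.toList.filter isCons
  if 1 ≤ aPos ∧ aPos ≤ cons.length then String.ofList [cons.getD (aPos - 1).toNat '@'] else "@"

-- ===== PRECONDITION & SPEC =====
def Spec_cons_num_py (aStr : String) (aPos : Int) (out : String) : Prop := out = cons_num_py_alt aStr aPos
instance (aStr : String) (aPos : Int) (out : String) : Decidable (Spec_cons_num_py aStr aPos out) := by unfold Spec_cons_num_py; infer_instance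

-- ===== CLAIM (what is proved, stated in full; the proofs are below) =====
def Claim_equal_cons_num_py : Prop := ∀ (aStr : String) (aPos : Int), Dom_cons_num_py aStr aPos → Spec_cons_num_py aStr aPos (cons_num_py aStr aPos)

-- ===== LEMMAS AND PROOFS =====

-- Loop invariant: A's loop with counter already at `num` computes B's filter-then-index shifted by num.
theorem consNumLoop_eq (l : List Char) : ∀ (num aPos : Int),
    consNumLoop l num aPos =
      (let cons := l.filter isCons
       if 1 ≤ aPos - num ∧ aPos - num ≤ cons.length then
         String.ofList [cons.getD (aPos - num - 1).toNat '@'] else "@") := by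
  induction l with
  | nil =>
    intro num aPos
    simp only [consNumLoop, List.filter_nil, List.length_nil]
    rw [if_neg (by push_cast; omega)]
  | cons ch t ih =>
    intro num aPos
    by_cases hc : isCons ch = true
    · have hv : ¬ ch ∈ ['A', 'E', 'I', 'O', 'U'] := by
        simpa [isCons] using hc
      rw [show (consNumLoop (ch :: t) num aPos) =
          (if num + 1 = aPos then String.ofList [ch] else consNumLoop t (num + 1) aPos) by
        simp [consNumLoop, hv]]
      simp only [List.filter_cons_of_pos hc, List.length_cons]
      by_cases hp : num + 1 = aPos
      · rw [if_pos hp, if_pos (by push_cast; omega)]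
        have hz : (aPos - num - 1).toNat = 0 := by omega
        rw [hz]
        rfl
      · rw [if_neg hp, ih]
        by_cases h1 : 1 ≤ aPos - num ∧ aPos - num ≤ ((t.filter isCons).length + 1 : Int)
        · rw [if_pos (by omega),
              if_pos (by omega)]
          have hn : (aPos - num - 1).toNat = (aPos - (num + 1) - 1).toNat + 1 := by omega
          rw [hn]
          rfl
        · rw [if_neg (by omega),
              if_neg (by omega)]
    · have hv : ch ∈ ['A', 'E', 'I', 'O', 'U'] := by
        by_contra h; exact hc (by simpa [isCons] using h)
      rw [show (consNumLoop (ch :: t) num aPos) = consNumLoop t num aPos by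
        simp [consNumLoop, hv]]
      rw [ih, List.filter_cons_of_neg (by simpa using hc)]

-- ===== VERDICT (by name: the statement is the Claim_ definition above) =====
theorem cons_num_py_spec : Claim_equal_cons_num_py := by
  intro aStr aPos _
  unfold Spec_cons_num_py cons_num_py cons_num_py_alt
  rw [consNumLoop_eq]
  simp
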